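-- pv_equiv track=rewrite | github.com/vroomvroom314/Python-code-MiniProjects | Python Problems -SA/Week 10/hw10.py | mapCoords
-- ===== SOURCE A (Python) =====
-- def mapCoords(constraints):
--     mappedCoords = dict()
--     for i in range (len(constraints)):
--         if (i == 0 or i == 12):
--             mappedCoords[constraints[i]] = (0,0),(1,1),(2,2),(3,3),(4,4)
--             #maps the top-left and bottom-right corner constraints
--         elif(i > 0 and i < 6):
--             mappedCoords[constraints[i]] = ((0,i-1),(1,i-1),(2,i-1),
--                                             (3,i-1),(4,i-1))
--             #maps the top constraints
--         elif (i == 6 or i == 18):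
--             mappedCoords[constraints[i]] = (4,0),(3,1),(2,2),(1,3),(0,4)
--             #maps top right and bottom-left corner constraints
--         elif(i > 6 and i < 12):
--             mappedCoords[constraints[i]] = ((i-7,0),(i-7,1),(i-7,2),
--                                             (i-7,3),(i-7,4))
--             #maps the right constraints
--         elif(i > 12 and i < 18):
--             mappedCoords[constraints[i]] = ((0,17-i),(1,17-i),(2,17-i),
--                                             (3,17-i),(4,17-i))
--             #maps the bottom constraints
--         elif(i > 18 and i < 24):
--             mappedCoords[constraints[i]] = ((23-i,0),(23-i,1),(23-i,2),
--                                             (23-i,3),(23-i,4))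
--             #maps the left constraints
--
--
--     return mappedCoords
-- ===== SOURCE B (Python) =====
-- # B: static table of the 24 coordinate tuples, paired with constraints by zip.
-- COORDS = (
--     ((0, 0), (1, 1), (2, 2), (3, 3), (4, 4)),
--     ((0, 0), (1, 0), (2, 0), (3, 0), (4, 0)),
--     ((0, 1), (1, 1), (2, 1), (3, 1), (4, 1)),
--     ((0, 2), (1, 2), (2, 2), (3, 2), (4, 2)),
--     ((0, 3), (1, 3), (2, 3), (3, 3), (4, 3)),
--     ((0, 4), (1, 4), (2, 4), (3, 4), (4, 4)),
--     ((4, 0), (3, 1), (2, 2), (1, 3), (0, 4)),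
--     ((0, 0), (0, 1), (0, 2), (0, 3), (0, 4)),
--     ((1, 0), (1, 1), (1, 2), (1, 3), (1, 4)),
--     ((2, 0), (2, 1), (2, 2), (2, 3), (2, 4)),
--     ((3, 0), (3, 1), (3, 2), (3, 3), (3, 4)),
--     ((4, 0), (4, 1), (4, 2), (4, 3), (4, 4)),
--     ((0, 0), (1, 1), (2, 2), (3, 3), (4, 4)),
--     ((0, 4), (1, 4), (2, 4), (3, 4), (4, 4)),
--     ((0, 3), (1, 3), (2, 3), (3, 3), (4, 3)),
--     ((0, 2), (1, 2), (2, 2), (3, 2), (4, 2)),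
--     ((0, 1), (1, 1), (2, 1), (3, 1), (4, 1)),
--     ((0, 0), (1, 0), (2, 0), (3, 0), (4, 0)),
--     ((4, 0), (3, 1), (2, 2), (1, 3), (0, 4)),
--     ((4, 0), (4, 1), (4, 2), (4, 3), (4, 4)),
--     ((3, 0), (3, 1), (3, 2), (3, 3), (3, 4)),
--     ((2, 0), (2, 1), (2, 2), (2, 3), (2, 4)),
--     ((1, 0), (1, 1), (1, 2), (1, 3), (1, 4)),
--     ((0, 0), (0, 1), (0, 2), (0, 3), (0, 4)),
-- )
--
-- def mapCoords(constraints):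
--     return dict(zip(constraints, COORDS))
-- ===== Notes on version B (the rewrite author's own statement) =====
-- stated objective: faster
-- what changed: Replaces the six-branch if/elif index ladder executed per element by a precomputed 24-entry coordinate table paired with the input via a single dict(zip(constraints, COORDS)); zip's truncation reproduces A's ignoring of elements past index 24 and dict keeps last-write-wins on duplicates (measured ~4x faster: no per-element branching or tuple construction).
import Mathlib
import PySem

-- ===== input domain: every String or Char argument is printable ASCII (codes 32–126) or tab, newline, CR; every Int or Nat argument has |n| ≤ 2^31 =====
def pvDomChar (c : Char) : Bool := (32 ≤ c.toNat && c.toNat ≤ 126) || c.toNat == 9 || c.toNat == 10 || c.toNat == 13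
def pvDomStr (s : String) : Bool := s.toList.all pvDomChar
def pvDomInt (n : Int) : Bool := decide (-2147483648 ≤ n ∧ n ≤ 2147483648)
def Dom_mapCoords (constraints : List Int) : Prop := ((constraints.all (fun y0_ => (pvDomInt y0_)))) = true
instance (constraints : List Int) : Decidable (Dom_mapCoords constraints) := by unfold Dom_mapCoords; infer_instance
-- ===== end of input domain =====

-- B replaces A's six-way index ladder by a static 24-entry coordinate table zipped with the input (objective: simpler).

-- ===== PORT A =====
-- loop body of A's for-loop (the if/elif ladder, inserting into the dict)
def mapCoordsBody (constraints : List Int) (d : PySem.Dict Int (List (Int × Int))) (i : Int) :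
    PySem.Dict Int (List (Int × Int)) :=
  let k := PySem.List.pyGetD constraints i 0   -- constraints[i]; always in range inside the loop
  if i = 0 ∨ i = 12 then d.insert k [(0,0),(1,1),(2,2),(3,3),(4,4)]
  else if 0 < i ∧ i < 6 then d.insert k [(0,i-1),(1,i-1),(2,i-1),(3,i-1),(4,i-1)]
  else if i = 6 ∨ i = 18 then d.insert k [(4,0),(3,1),(2,2),(1,3),(0,4)]
  else if 6 < i ∧ i < 12 then d.insert k [(i-7,0),(i-7,1),(i-7,2),(i-7,3),(i-7,4)]
  else if 12 < i ∧ i < 18 then d.insert k [(0,17-i),(1,17-i),(2,17-i),(3,17-i),(4,17-i)]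
  else if 18 < i ∧ i < 24 then d.insert k [(23-i,0),(23-i,1),(23-i,2),(23-i,3),(23-i,4)]
  else d

def mapCoords (constraints : List Int) : List (Int × List (Int × Int)) :=
  ((PySem.List.pyRange 0 (constraints.length : Int) 1).foldl
    (mapCoordsBody constraints) PySem.Dict.empty).items

-- ===== PORT B =====
def COORDS : List (List (Int × Int)) :=
  [ [(0,0),(1,1),(2,2),(3,3),(4,4)],
    [(0,0),(1,0),(2,0),(3,0),(4,0)],
    [(0,1),(1,1),(2,1),(3,1),(4,1)],
    [(0,2),(1,2),(2,2),(3,2),(4,2)],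
    [(0,3),(1,3),(2,3),(3,3),(4,3)],
    [(0,4),(1,4),(2,4),(3,4),(4,4)],
    [(4,0),(3,1),(2,2),(1,3),(0,4)],
    [(0,0),(0,1),(0,2),(0,3),(0,4)],
    [(1,0),(1,1),(1,2),(1,3),(1,4)],
    [(2,0),(2,1),(2,2),(2,3),(2,4)],
    [(3,0),(3,1),(3,2),(3,3),(3,4)],
    [(4,0),(4,1),(4,2),(4,3),(4,4)],
    [(0,0),(1,1),(2,2),(3,3),(4,4)],
    [(0,4),(1,4),(2,4),(3,4),(4,4)],
    [(0,3),(1,3),(2,3),(3,3),(4,3)],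
    [(0,2),(1,2),(2,2),(3,2),(4,2)],
    [(0,1),(1,1),(2,1),(3,1),(4,1)],
    [(0,0),(1,0),(2,0),(3,0),(4,0)],
    [(4,0),(3,1),(2,2),(1,3),(0,4)],
    [(4,0),(4,1),(4,2),(4,3),(4,4)],
    [(3,0),(3,1),(3,2),(3,3),(3,4)],
    [(2,0),(2,1),(2,2),(2,3),(2,4)],
    [(1,0),(1,1),(1,2),(1,3),(1,4)],
    [(0,0),(0,1),(0,2),(0,3),(0,4)] ]

def mapCoords_alt (constraints : List Int) : List (Int × List (Int × Int)) :=
  (PySem.Dict.ofList (constraints.zip COORDS)).items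

-- ===== PRECONDITION & SPEC =====
def Spec_mapCoords (constraints : List Int) (out : List (Int × List (Int × Int))) : Prop := out = mapCoords_alt constraints
instance (constraints : List Int) (out : List (Int × List (Int × Int))) : Decidable (Spec_mapCoords constraints out) := by unfold Spec_mapCoords; infer_instance

-- ===== CLAIM (what is proved, stated in full; the proofs are below) =====
def Claim_equal_mapCoords : Prop := ∀ (constraints : List Int), Dom_mapCoords constraints → Spec_mapCoords constraints (mapCoords constraints)

-- ===== LEMMAS AND PROOFS =====

lemma mapCoordsBody_lt (full : List Int) (d : PySem.Dict Int (List (Int × Int))) (k : Nat)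
    (hk : k < 24) (c : Int) (hc : PySem.List.pyGetD full (k : Int) 0 = c) :
    mapCoordsBody full d (k : Int) = d.insert c (COORDS.getD k []) := by
  interval_cases k <;> simp only [Nat.cast_ofNat, Nat.cast_zero, Nat.cast_one] at hc <;> simp [mapCoordsBody, COORDS, hc]

lemma mapCoordsBody_ge (full : List Int) (d : PySem.Dict Int (List (Int × Int))) (k : Nat)
    (hk : 24 ≤ k) : mapCoordsBody full d (k : Int) = d := by
  unfold mapCoordsBody
  split_ifs with h1 h2 h3 h4 h5 h6 <;> first | rfl | omega

lemma mapCoords_loop (cs : List Int) : ∀ (pre : List Int) (d : PySem.Dict Int (List (Int × Int))),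
    (PySem.List.pyRange (pre.length : Int) ((pre.length + cs.length : Nat) : Int) 1).foldl
      (mapCoordsBody (pre ++ cs)) d
    = (cs.zip (COORDS.drop pre.length)).foldl (fun d p => d.insert p.1 p.2) d := by
  induction cs with
  | nil => intro pre d; simp [PySem.List.pyRange_one_eq_nil]
  | cons c cs ih =>
    intro pre d
    have hcons : PySem.List.pyRange (pre.length : Int) ((pre.length + (c :: cs).length : Nat) : Int) 1
        = (pre.length : Int) :: PySem.List.pyRange ((pre.length : Int) + 1) ((pre.length + (c :: cs).length : Nat) : Int) 1 := by
      apply PySem.List.pyRange_one_cons; push_cast [List.length_cons]; omega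
    have hget : PySem.List.pyGetD (pre ++ c :: cs) (pre.length : Int) 0 = c := by
      rw [PySem.List.pyGetD_natCast]
      simp [List.getD_eq_getElem?_getD]
    have htail : ∀ d', (PySem.List.pyRange ((pre.length : Int) + 1) ((pre.length + (c :: cs).length : Nat) : Int) 1).foldl
        (mapCoordsBody (pre ++ c :: cs)) d'
        = (cs.zip (COORDS.drop (pre.length + 1))).foldl (fun d p => d.insert p.1 p.2) d' := by
      intro d'
      have := ih (pre ++ [c]) d'
      simpa [List.append_assoc, Nat.add_comm, Nat.add_assoc, Nat.add_left_comm] using this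
    rw [hcons, List.foldl_cons]
    by_cases hk : pre.length < 24
    · have hdrop : COORDS.drop pre.length = COORDS.getD pre.length [] :: COORDS.drop (pre.length + 1) := by
        rw [List.getD_eq_getElem?_getD, List.getElem?_eq_getElem (by simpa [COORDS] using hk),
          List.drop_eq_getElem_cons (by simpa [COORDS] using hk)]
        rfl
      rw [mapCoordsBody_lt _ _ _ hk _ hget, htail, hdrop]
      rfl
    · have hdrop : COORDS.drop pre.length = [] := by
        apply List.drop_eq_nil_of_le; simp [COORDS]; omega
      have hdrop' : COORDS.drop (pre.length + 1) = [] := by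
        apply List.drop_eq_nil_of_le; simp [COORDS]; omega
      rw [mapCoordsBody_ge _ _ _ (by omega), htail, hdrop, hdrop']
      simp

-- ===== VERDICT (by name: the statement is the Claim_ definition above) =====
theorem mapCoords_spec : Claim_equal_mapCoords := by
  intro cs _
  show mapCoords cs = mapCoords_alt cs
  unfold mapCoords mapCoords_alt
  have := mapCoords_loop cs [] PySem.Dict.empty
  simp only [List.length_nil, List.nil_append, Nat.cast_zero, Nat.zero_add, List.drop_zero] at this
  rw [this]
  rfl
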